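-- pv_equiv track=rewrite | github.com/WadeMcCall/ProjectEulerPython | primeDigitReplacements.py | replace_digits_with_asterisks
-- ===== SOURCE A (Python) =====
-- from itertools import combinations, permutations
--
-- def replace_digits_with_asterisks(num, x):
--     num = str(num)
--     num_length = len(num)
--     result = []
--
--     # Iterate over all possible combinations of x positions within the number
--     for combo in combinations(range(num_length - 1), x):  # Exclude the last digit
--         replaced_num = list(num)  # Convert to list for easy replacement
--         for index in combo:
--             replaced_num[index] = '*'
--         result.append(''.join(replaced_num))
--
--     return result
-- ===== SOURCE B (Python) =====
-- def replace_digits_with_asterisks(num, x):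
--     # Recursive subset enumeration over digit positions with a remaining-asterisk
--     # budget, instead of itertools.combinations over index tuples.
--     s = str(num)
--     if x < 0:
--         return []
--     out = []
--
--     def go(pos, remaining, prefix):
--         if remaining == 0:
--             out.append(prefix + s[pos:])
--         elif len(s) - 1 - pos < remaining:
--             return
--         else:
--             go(pos + 1, remaining - 1, prefix + '*')
--             go(pos + 1, remaining, prefix + s[pos])
--
--     go(0, x, '')
--     return out
-- ===== Notes on version B (the rewrite author's own statement) =====
-- stated objective: alternative
-- what changed: Replaces itertools.combinations over index tuples plus per-combination list copy/join with a direct recursion over digit positions carrying a remaining-asterisk budget and a string prefix, emitting results in the same lexicographic order.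
import Mathlib
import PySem

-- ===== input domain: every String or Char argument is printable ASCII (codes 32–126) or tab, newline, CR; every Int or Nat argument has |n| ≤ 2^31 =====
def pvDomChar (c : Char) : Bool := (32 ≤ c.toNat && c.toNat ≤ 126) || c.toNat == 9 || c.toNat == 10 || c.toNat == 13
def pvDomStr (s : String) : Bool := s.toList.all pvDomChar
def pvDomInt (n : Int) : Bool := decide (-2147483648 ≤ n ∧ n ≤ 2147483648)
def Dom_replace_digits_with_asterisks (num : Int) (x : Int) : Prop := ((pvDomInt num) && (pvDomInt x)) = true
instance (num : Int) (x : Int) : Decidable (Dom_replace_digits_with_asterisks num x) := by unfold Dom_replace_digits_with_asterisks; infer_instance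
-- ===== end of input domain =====

-- B replaces the itertools.combinations index enumeration by a budgeted recursion over
-- digit positions; equivalence of the return value is proved for x ≥ 0 (A raises for x < 0).

-- ===== PORT A =====
-- itertools.combinations(l, k) in lexicographic order (hand helper; no Lean equivalent)
def combosA {α : Type} (l : List α) (k : Nat) : List (List α) :=
  match k, l with
  | 0, _ => [[]]
  | _ + 1, [] => []
  | k + 1, a :: rest => ((combosA rest k).map (fun c => a :: c)) ++ combosA rest (k + 1)

-- x.toNat is faithful for x ≥ 0 (Pre_); for x < 0 Python raises ValueError.
-- replaced_num[index] = '*' is List.set (index is a nonnegative in-range int from range()).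
def replace_digits_with_asterisks (num : Int) (x : Int) : List String :=
  (combosA (PySem.List.pyRange 0 (PySem.Str.len (PySem.Int.toStr num) - 1) 1) x.toNat).map
    (fun combo =>
      String.mk (combo.foldl (fun acc index => acc.set index.toNat '*')
        (PySem.Int.toStr num).toList))

-- ===== PORT B =====
-- go(pos, remaining, prefix) ported with rest = s[pos:] carried as a list
def bGo (rest : List Char) (remaining : Int) (pre : List Char) : List String :=
  if remaining = 0 then [String.mk (pre ++ rest)]
  else if (rest.length : Int) - 1 < remaining then []
  else
    match rest with
    | [] => []
    | c :: rs => bGo rs (remaining - 1) (pre ++ ['*']) ++ bGo rs remaining (pre ++ [c])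
termination_by rest.length

def replace_digits_with_asterisks_alt (num : Int) (x : Int) : List String :=
  if x < 0 then []
  else bGo (PySem.Int.toStr num).toList x []

-- ===== PRECONDITION & SPEC =====
-- A raises ValueError (combinations' r must be non-negative) for x < 0; excluded here.
def Pre_replace_digits_with_asterisks (num : Int) (x : Int) : Prop := 0 ≤ x
instance (num : Int) (x : Int) : Decidable (Pre_replace_digits_with_asterisks num x) := by
  unfold Pre_replace_digits_with_asterisks; infer_instance
def pvWitness_replace_digits_with_asterisks : Int × Int := (123, 1)

def Spec_replace_digits_with_asterisks (num : Int) (x : Int) (out : List String) : Prop := out = replace_digits_with_asterisks_alt num x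
instance (num : Int) (x : Int) (out : List String) : Decidable (Spec_replace_digits_with_asterisks num x out) := by unfold Spec_replace_digits_with_asterisks; infer_instance

-- ===== CLAIM (what is proved, stated in full; the proofs are below) =====
def Claim_equal_replace_digits_with_asterisks : Prop := ∀ (num : Int) (x : Int), Dom_replace_digits_with_asterisks num x → Pre_replace_digits_with_asterisks num x → Spec_replace_digits_with_asterisks num x (replace_digits_with_asterisks num x)

-- ===== LEMMAS AND PROOFS =====

-- abstract enumeration both ports are reduced to: choose k positions among elig (lex order)
def pick (elig : List Char) (k : Nat) : List (List Char) :=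
  match k, elig with
  | 0, l => [l]
  | _ + 1, [] => []
  | k + 1, c :: rest => ((pick rest k).map (fun t => '*' :: t)) ++ ((pick rest (k + 1)).map (fun t => c :: t))

theorem pick_len (elig : List Char) : ∀ k : Nat, elig.length < k → pick elig k = [] := by
  induction elig with
  | nil => intro k hk; cases k with
    | zero => omega
    | succ k => simp [pick]
  | cons c rest ih =>
    intro k hk
    cases k with
    | zero => omega
    | succ k =>
      simp only [pick]
      rw [ih k (by simpa using hk), ih (k + 1) (by simp at hk; omega)]
      simp

theorem combosA_map {α β : Type} (f : α → β) (l : List α) : ∀ k : Nat,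
    combosA (l.map f) k = (combosA l k).map (List.map f) := by
  induction l with
  | nil => intro k; cases k <;> simp [combosA]
  | cons a rest ih =>
    intro k
    cases k with
    | zero => simp [combosA]
    | succ k =>
      simp only [List.map_cons, combosA, ih, List.map_append, List.map_map]
      rfl

theorem setFold_shift (combo : List Nat) : ∀ (c : Char) (cs : List Char),
    combo.foldl (fun acc i => acc.set (i + 1) '*') (c :: cs)
      = c :: combo.foldl (fun acc i => acc.set i '*') cs := by
  induction combo with
  | nil => intro c cs; simp
  | cons a rest ih => intro c cs; simp [List.foldl_cons, ih]

theorem A_pick (elig : List Char) : ∀ (lc : Char) (k : Nat),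
    (combosA (List.range elig.length) k).map
        (fun combo => combo.foldl (fun acc i => acc.set i '*') (elig ++ [lc]))
      = (pick elig k).map (fun t => t ++ [lc]) := by
  induction elig with
  | nil => intro lc k; cases k <;> simp [combosA, pick]
  | cons c rest ih =>
    intro lc k
    cases k with
    | zero => simp [combosA, pick]
    | succ k =>
      rw [List.length_cons, List.range_succ_eq_map]
      simp only [combosA, pick, List.map_append, List.map_map]
      congr 1
      · rw [combosA_map]
        rw [List.map_map]
        have : ∀ combo : List Nat,
            ((0 :: combo.map Nat.succ).foldl (fun acc i => acc.set i '*') (c :: rest ++ [lc]))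
              = '*' :: combo.foldl (fun acc i => acc.set i '*') (rest ++ [lc]) := by
          intro combo
          simp only [List.foldl_cons, List.cons_append, List.set_cons_zero, List.foldl_map]
          exact setFold_shift combo '*' (rest ++ [lc])
        calc (combosA (List.range rest.length) k).map
              ((fun combo => combo.foldl (fun acc i => acc.set i '*') ((c :: rest) ++ [lc])) ∘
                fun c_1 => 0 :: c_1.map Nat.succ)
            = (combosA (List.range rest.length) k).map
              (fun combo => '*' :: combo.foldl (fun acc i => acc.set i '*') (rest ++ [lc])) := by
              apply List.map_congr_left; intro combo _; exact this combo
          _ = ((combosA (List.range rest.length) k).map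
              (fun combo => combo.foldl (fun acc i => acc.set i '*') (rest ++ [lc]))).map
                (fun t => '*' :: t) := by rw [List.map_map]; rfl
          _ = ((pick rest k).map (fun t => t ++ [lc])).map (fun t => '*' :: t) := by rw [ih]
          _ = (pick rest k).map ((fun t => t ++ [lc]) ∘ fun t => '*' :: t) := by
              rw [List.map_map]; rfl
      · rw [combosA_map, List.map_map]
        have : ∀ combo : List Nat,
            ((combo.map Nat.succ).foldl (fun acc i => acc.set i '*') (c :: rest ++ [lc]))
              = c :: combo.foldl (fun acc i => acc.set i '*') (rest ++ [lc]) := by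
          intro combo
          simp only [List.foldl_map, List.cons_append]
          exact setFold_shift combo c (rest ++ [lc])
        calc (combosA (List.range rest.length) (k + 1)).map
              ((fun combo => combo.foldl (fun acc i => acc.set i '*') ((c :: rest) ++ [lc])) ∘
                List.map Nat.succ)
            = (combosA (List.range rest.length) (k + 1)).map
              (fun combo => c :: combo.foldl (fun acc i => acc.set i '*') (rest ++ [lc])) := by
              apply List.map_congr_left; intro combo _; exact this combo
          _ = ((combosA (List.range rest.length) (k + 1)).map
              (fun combo => combo.foldl (fun acc i => acc.set i '*') (rest ++ [lc]))).map
                (fun t => c :: t) := by rw [List.map_map]; rfl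
          _ = ((pick rest (k + 1)).map (fun t => t ++ [lc])).map (fun t => c :: t) := by rw [ih]
          _ = (pick rest (k + 1)).map ((fun t => t ++ [lc]) ∘ fun t => c :: t) := by
              rw [List.map_map]; rfl

theorem B_pick (elig : List Char) : ∀ (lc : Char) (k : Nat) (pre : List Char),
    bGo (elig ++ [lc]) (k : Int) pre
      = (pick elig k).map (fun t => String.mk (pre ++ t ++ [lc])) := by
  induction elig with
  | nil =>
    intro lc k pre
    cases k with
    | zero => simp [bGo, pick]
    | succ k =>
      rw [bGo.eq_def]
      rw [if_neg (by omega), if_pos (by simp)]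
      simp [pick]
  | cons c rest ih =>
    intro lc k pre
    cases k with
    | zero => simp [bGo, pick]
    | succ k =>
      rw [bGo.eq_def]
      rw [if_neg (by omega)]
      by_cases hlen : rest.length < k
      · rw [if_pos (by simp; omega)]
        simp [pick, pick_len rest k hlen, pick_len rest (k + 1) (by omega)]
      · rw [if_neg (by simp; omega)]
        simp only [List.cons_append]
        have h1 : (((k + 1 : Nat) : Nat) : Int) - 1 = ((k : Nat) : Int) := by push_cast; ring
        rw [h1, ih lc k (pre ++ ['*']), ih lc (k + 1) (pre ++ [c])]
        simp [pick, List.map_map, Function.comp_def]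

theorem main_list (cs : List Char) (k : Nat) :
    (combosA (PySem.List.pyRange 0 ((cs.length : Int) - 1) 1) k).map
        (fun combo => String.mk (combo.foldl (fun acc i => acc.set i.toNat '*') cs))
      = bGo cs (k : Int) [] := by
  rcases List.eq_nil_or_concat cs with hnil | ⟨elig, lc, hdec⟩
  · subst hnil
    have hr : PySem.List.pyRange 0 ((([] : List Char).length : Int) - 1) 1 = [] := by
      apply PySem.List.pyRange_one_eq_nil; simp
    rw [hr]
    cases k with
    | zero => simp [combosA, bGo]
    | succ k =>
      rw [bGo.eq_def]
      rw [if_neg (by omega), if_pos (by simp)]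
      simp [combosA]
  · rw [hdec, List.concat_eq_append]
    have hlen : (((elig ++ [lc]).length : Int) - 1) = (elig.length : Int) := by
      simp
    rw [hlen]
    have hrange : PySem.List.pyRange 0 (elig.length : Int) 1
        = (List.range elig.length).map (fun j => ((j : Nat) : Int)) := by
      rw [PySem.List.pyRange_one]; simp
    rw [hrange, combosA_map, List.map_map, B_pick elig lc k []]
    calc (combosA (List.range elig.length) k).map
          ((fun combo => String.mk (combo.foldl (fun acc i => acc.set i.toNat '*') (elig ++ [lc]))) ∘
            List.map (fun j => ((j : Nat) : Int)))
        = (combosA (List.range elig.length) k).map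
          (fun combo => String.mk (combo.foldl (fun acc i => acc.set i '*') (elig ++ [lc]))) := by
          apply List.map_congr_left; intro combo _
          simp [List.foldl_map]
      _ = ((combosA (List.range elig.length) k).map
          (fun combo => combo.foldl (fun acc i => acc.set i '*') (elig ++ [lc]))).map String.mk := by
          rw [List.map_map]; rfl
      _ = ((pick elig k).map (fun t => t ++ [lc])).map String.mk := by rw [A_pick]
      _ = (pick elig k).map (fun t => String.mk (([] : List Char) ++ t ++ [lc])) := by
          rw [List.map_map]; apply List.map_congr_left; intro t _; simp [Function.comp_def]

-- ===== VERDICT (by name: the statement is the Claim_ definition above) =====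
theorem replace_digits_with_asterisks_spec : Claim_equal_replace_digits_with_asterisks := by
  intro num x _ hpre
  unfold Spec_replace_digits_with_asterisks
  unfold Pre_replace_digits_with_asterisks at hpre
  unfold replace_digits_with_asterisks replace_digits_with_asterisks_alt
  rw [if_neg (by omega)]
  have hx : ((x.toNat : Nat) : Int) = x := Int.toNat_of_nonneg hpre
  have hlen : PySem.Str.len (PySem.Int.toStr num)
      = (((PySem.Int.toStr num).toList.length : Nat) : Int) := by
    simp [PySem.Str.len]
  rw [hlen, ← hx]
  exact main_list (PySem.Int.toStr num).toList x.toNat
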